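-- pv_equiv track=rewrite | github.com/yyeongeun/codingtest | programmers/모음사전.py | solution
-- ===== SOURCE A (Python) =====
-- def solution(word):
--     char = {'A':0,'E':1,'I':2,'O':3,'U':4}
--     re = (((5+1)*5+1)*5+1)*5+1
--     answer = len(word)
--
--     for i in word:
--         answer += re*char[i]
--         re = (re-1)//5
--
--     return answer
-- ===== SOURCE B (Python) =====
-- def solution(word):
--     # Build the full vowel dictionary (all words of length 1..5 over AEIOU)
--     # in dictionary order by preorder DFS, then look the word up.
--     table = []
--
--     def gen(prefix):
--         if len(prefix) == 5:
--             return
--         for v in "AEIOU":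
--             w = prefix + v
--             table.append(w)
--             gen(w)
--
--     gen("")
--     return table.index(word) + 1
-- ===== Notes on version B (the rewrite author's own statement) =====
-- stated objective: alternative
-- what changed: B replaces A's positional-value arithmetic (per-char weight 781,156,31,6,1) by materialising the whole 3905-word vowel dictionary in order via preorder DFS and returning list.index(word)+1.
-- outside the precondition, e.g. on solution(''): A returns 0, B raises ValueError; on solution('AAAAAA'): A returns 6, B raises ValueError; on solution('B'): A raises KeyError, B raises ValueError
import Mathlib
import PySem

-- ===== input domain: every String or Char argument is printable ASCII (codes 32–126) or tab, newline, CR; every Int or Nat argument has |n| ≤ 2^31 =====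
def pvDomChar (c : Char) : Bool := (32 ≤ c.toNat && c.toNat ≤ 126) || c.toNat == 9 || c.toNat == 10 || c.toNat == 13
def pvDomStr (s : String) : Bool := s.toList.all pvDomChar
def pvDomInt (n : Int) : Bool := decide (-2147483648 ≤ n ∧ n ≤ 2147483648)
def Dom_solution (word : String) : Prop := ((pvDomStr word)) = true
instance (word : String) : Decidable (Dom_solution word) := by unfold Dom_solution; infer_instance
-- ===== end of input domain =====

-- B replaces A's positional-value arithmetic by materialising the full ordered vowel dictionary
-- (preorder DFS over 'AEIOU', lengths 1..5) and looking the word up; objective: alternative (not faster).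


-- ===== PORT A =====
-- char = {'A':0,'E':1,'I':2,'O':3,'U':4}
def charA : PySem.Dict Char Int :=
  PySem.Dict.ofList [('A', 0), ('E', 1), ('I', 2), ('O', 3), ('U', 4)]

-- one iteration of A's loop body over state (answer, re); char[i] raises KeyError for
-- non-vowel i (Pre_solution excludes those inputs), so the .getD 0 default is never used there
def stepA (s : Int × Int) (i : Char) : Int × Int :=
  (s.1 + s.2 * ((charA.get? i).getD 0), PySem.Int.floordiv (s.2 - 1) 5)

def solution (word : String) : Int :=
  (word.toList.foldl stepA (PySem.Str.len word, (((5 + 1) * 5 + 1) * 5 + 1) * 5 + 1)).1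

-- ===== PORT B =====
-- preorder DFS of Source B's gen(prefix): for each vowel v, emit prefix+v, then recurse (depth cap 5)
def genTable : Nat → List Char → List (List Char)
  | 0, _ => []
  | n + 1, p => (['A', 'E', 'I', 'O', 'U'] : List Char).flatMap
      (fun v => (p ++ [v]) :: genTable n (p ++ [v]))

def solution_alt (word : String) : Int :=
  match PySem.List.index? (genTable 5 []) word.toList with
  | some i => (i : Int) + 1
  | none => 0  -- Python's list.index raises ValueError here; Pre_solution excludes these inputs

-- ===== PRECONDITION & SPEC =====
-- Pre_ excludes words outside the problem's vocabulary (non-vowel chars, on which A raises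
-- KeyError; the empty word and words longer than 5, on which A returns len(word) plus the
-- positional digits of the first 5 chars while B's list.index raises ValueError).
def Pre_solution (word : String) : Prop :=
  word.toList ≠ [] ∧ word.toList.length ≤ 5 ∧
    word.toList.all (fun c => c == 'A' || c == 'E' || c == 'I' || c == 'O' || c == 'U') = true
instance (word : String) : Decidable (Pre_solution word) := by
  unfold Pre_solution; infer_instance

def pvWitness_solution : String := "EIO"

def Spec_solution (word : String) (out : Int) : Prop := out = solution_alt word
instance (word : String) (out : Int) : Decidable (Spec_solution word out) := by
  unfold Spec_solution; infer_instance

-- ===== CLAIM (what is proved, stated in full; the proofs are below) =====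
def Claim_equal_solution : Prop :=
  ∀ (word : String), Dom_solution word → Pre_solution word → Spec_solution word (solution word)

-- ===== LEMMAS AND PROOFS =====

-- position of a vowel in 'AEIOU'
def vval (c : Char) : Nat := (['A', 'E', 'I', 'O', 'U'] : List Char).idxOf c

-- number of words of length 1..n over a 5-letter alphabet (= length of genTable n p)
def flen : Nat → Nat
  | 0 => 0
  | n + 1 => 5 * (flen n + 1)

-- 0-based rank of a nonempty vowel word of length ≤ n in genTable n p (independent of p)
def rank : Nat → List Char → Nat
  | _, [] => 0
  | 0, _ :: _ => 0
  | n + 1, c :: s => vval c * (flen n + 1) + (if s = [] then 0 else 1 + rank n s)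

-- the value of A's re after (5 - n) iterations
def R : Nat → Int
  | 0 => 0
  | n + 1 => (flen n : Int) + 1

lemma gen_length : ∀ (n : Nat) (p : List Char), (genTable n p).length = flen n := by
  intro n
  induction n with
  | zero => intro p; rfl
  | succ m ih =>
      intro p
      simp [genTable, List.flatMap_cons, List.flatMap_nil, ih, flen]
      omega

lemma gen_shape : ∀ (n : Nat) (p x : List Char),
    x ∈ genTable n p → ∃ s, s ≠ [] ∧ x = p ++ s := by
  intro n
  induction n with
  | zero => intro p x hx; simp [genTable] at hx
  | succ m ih =>
      intro p x hx
      simp only [genTable, List.mem_flatMap] at hx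
      obtain ⟨v, _, hx⟩ := hx
      rcases List.mem_cons.mp hx with h | h
      · exact ⟨[v], by simp, h⟩
      · obtain ⟨s, hs, rfl⟩ := ih (p ++ [v]) _ h
        exact ⟨v :: s, by simp, by simp⟩

lemma not_mem_block {v c : Char} (hvc : v ≠ c) (n : Nat) (p s : List Char) :
    p ++ c :: s ∉ ((p ++ [v]) :: genTable n (p ++ [v])) := by
  intro h
  rcases List.mem_cons.mp h with h | h
  · have := List.append_cancel_left h
    simp at this
    exact hvc this.1.symm
  · obtain ⟨s', _, h'⟩ := gen_shape n (p ++ [v]) _ h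
    rw [List.append_assoc] at h'
    have := List.append_cancel_left h'
    simp at this
    exact hvc this.1.symm

lemma idx_skip (l t : List (List Char)) (w : List Char) (h : w ∉ l) :
    PySem.List.index? (l ++ t) w = (PySem.List.index? t w).map (· + l.length) := by
  induction l with
  | nil =>
      rw [List.nil_append]
      cases PySem.List.index? t w <;> simp
  | cons x xs ih =>
      have hx : x ≠ w := fun he => h (he ▸ List.mem_cons_self ..)
      have hxs : w ∉ xs := fun hm => h (List.mem_cons_of_mem _ hm)
      rw [List.cons_append, PySem.List.index?_cons_of_ne (xs ++ t) hx, ih hxs]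
      cases h' : PySem.List.index? t w <;> simp [h'] <;> omega

-- skipping one whole block of genTable (n+1) p for a vowel v ≠ c
lemma skip_block {v c : Char} (hvc : v ≠ c) (n : Nat) (p s : List Char)
    (t : List (List Char)) :
    PySem.List.index? (((p ++ [v]) :: genTable n (p ++ [v])) ++ t) (p ++ c :: s)
      = (PySem.List.index? t (p ++ c :: s)).map (· + (flen n + 1)) := by
  rw [idx_skip _ _ _ (not_mem_block hvc n p s)]
  simp [gen_length]

-- index in the flatMap over a vowel list vs, given the index j inside c's own block
lemma gen_index_aux (n : Nat) (p : List Char) (c : Char) (s : List Char) (j : Nat)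
    (hj : PySem.List.index? ((p ++ [c]) :: genTable n (p ++ [c])) (p ++ c :: s) = some j) :
    ∀ (vs : List Char), c ∈ vs →
      PySem.List.index? (vs.flatMap (fun v => (p ++ [v]) :: genTable n (p ++ [v]))) (p ++ c :: s)
        = some (vs.idxOf c * (flen n + 1) + j) := by
  intro vs
  induction vs with
  | nil => intro h; simp at h
  | cons v vs ih =>
      intro hc
      by_cases hvc : v = c
      · subst hvc
        have hmem : p ++ v :: s ∈ (p ++ [v]) :: genTable n (p ++ [v]) :=
          (PySem.List.index?_isSome_iff _ _).mp (by rw [hj]; rfl)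
        rw [List.flatMap_cons, PySem.List.index?_append_of_mem _ hmem, hj]
        simp [List.idxOf_cons_self]
      · have hc' : c ∈ vs := by
          rcases List.mem_cons.mp hc with h | h
          · exact absurd h.symm hvc
          · exact h
        rw [List.flatMap_cons, skip_block hvc, ih hc']
        have : (v :: vs).idxOf c = vs.idxOf c + 1 := by
          simp [hvc]
        rw [this]
        simp
        ring

lemma vowel_cases {c : Char} (h : c ∈ (['A', 'E', 'I', 'O', 'U'] : List Char)) :
    c = 'A' ∨ c = 'E' ∨ c = 'I' ∨ c = 'O' ∨ c = 'U' := by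
  simpa using h

lemma gen_index : ∀ (n : Nat) (p : List Char) (c : Char) (s : List Char),
    c ∈ (['A', 'E', 'I', 'O', 'U'] : List Char) →
    (∀ d ∈ s, d ∈ (['A', 'E', 'I', 'O', 'U'] : List Char)) →
    s.length ≤ n →
    PySem.List.index? (genTable (n + 1) p) (p ++ c :: s) = some (rank (n + 1) (c :: s)) := by
  intro n
  induction n with
  | zero =>
      intro p c s hc hs hlen
      have hsnil : s = [] := List.eq_nil_of_length_eq_zero (Nat.le_zero.mp hlen)
      subst hsnil
      have hj : PySem.List.index? ((p ++ [c]) :: genTable 0 (p ++ [c])) (p ++ [c]) = some 0 :=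
        PySem.List.index?_cons_self _ _
      have := gen_index_aux 0 p c [] 0 hj _ hc
      simp only [genTable] at this ⊢
      rw [this]
      simp [rank, vval, flen]
  | succ m ih =>
      intro p c s hc hs hlen
      cases s with
      | nil =>
          have hj : PySem.List.index? ((p ++ [c]) :: genTable (m + 1) (p ++ [c]))
              (p ++ [c]) = some 0 := PySem.List.index?_cons_self _ _
          have := gen_index_aux (m + 1) p c [] 0 hj _ hc
          simp only [genTable] at this ⊢
          rw [this]
          simp [rank, vval]
      | cons d s' =>
          have hlen' : s'.length ≤ m := by simpa using hlen
          have hinner := ih (p ++ [c]) d s' (hs d (by simp)) (fun x hx => hs x (by simp [hx])) hlen'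
          have hne : p ++ [c] ≠ p ++ c :: d :: s' := by
            intro he
            have := congrArg List.length he
            simp at this
          have hj : PySem.List.index? ((p ++ [c]) :: genTable (m + 1) (p ++ [c]))
              (p ++ c :: d :: s') = some (rank (m + 1) (d :: s') + 1) := by
            rw [PySem.List.index?_cons_of_ne _ hne]
            have : p ++ c :: d :: s' = (p ++ [c]) ++ d :: s' := by simp
            rw [this, hinner]
            rfl
          have := gen_index_aux (m + 1) p c (d :: s') _ hj _ hc
          simp only [genTable] at this ⊢
          rw [this]
          simp only [rank, vval]
          simp
          ring

lemma getD_vowel {c : Char} (h : c ∈ (['A', 'E', 'I', 'O', 'U'] : List Char)) :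
    ((charA.get? c).getD 0) = ((vval c : Nat) : Int) := by
  rcases vowel_cases h with rfl | rfl | rfl | rfl | rfl <;> decide

lemma floordiv_R : ∀ n : Nat, PySem.Int.floordiv (R (n + 1) - 1) 5 = R n := by
  intro n
  cases n with
  | zero => decide
  | succ m =>
      have h1 : R (m + 1 + 1) - 1 = ((5 * (flen m + 1) : Nat) : Int) := by
        simp [R, flen]
      rw [h1, PySem.Int.floordiv_eq_ediv_of_pos (by norm_num)]
      have : ((5 * (flen m + 1) : Nat) : Int) = 5 * ((flen m : Int) + 1) := by push_cast; ring
      rw [this, Int.mul_ediv_cancel_left _ (by norm_num)]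
      simp [R]

lemma foldA : ∀ (s : List Char) (n : Nat) (a : Int), s ≠ [] → s.length ≤ n →
    (∀ d ∈ s, d ∈ (['A', 'E', 'I', 'O', 'U'] : List Char)) →
    (s.foldl stepA (a, R n)).1 + (s.length : Int) = a + (rank n s : Nat) + 1 := by
  intro s
  induction s with
  | nil => intro n a h; exact absurd rfl h
  | cons c s' ih =>
      intro n a _ hlen hv
      obtain ⟨m, rfl⟩ : ∃ m, n = m + 1 := by
        cases n with
        | zero => simp at hlen
        | succ m => exact ⟨m, rfl⟩
      have hstep : stepA (a, R (m + 1)) c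
          = (a + R (m + 1) * ((vval c : Nat) : Int), R m) := by
        simp only [stepA, floordiv_R]
        rw [getD_vowel (hv c (by simp))]
      cases s' with
      | nil =>
          simp only [List.foldl_cons, List.foldl_nil, hstep]
          simp [rank, vval, R]
          push_cast
          ring
      | cons d s'' =>
          have hlen' : (d :: s'').length ≤ m := by simpa using hlen
          have := ih (m) (a + R (m + 1) * ((vval c : Nat) : Int)) (by simp) hlen'
            (fun x hx => hv x (by simp [hx]))
          have hr : ((rank (m + 1) (c :: d :: s'')) : Int)
              = R (m + 1) * ((vval c : Nat) : Int) + ((rank m (d :: s'')) : Int) + 1 := by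
            simp only [rank, R]
            push_cast
            ring
          simp only [List.foldl_cons, hstep] at this ⊢
          push_cast [List.length_cons] at this ⊢
          linarith [this, hr]

-- ===== VERDICT (by name: the statement is the Claim_ definition above) =====
theorem solution_spec : Claim_equal_solution := by
  intro word _ hpre
  obtain ⟨hne, hlen, hvb⟩ := hpre
  have hv : ∀ c ∈ word.toList, c ∈ (['A', 'E', 'I', 'O', 'U'] : List Char) := by
    intro c hc
    have := List.all_eq_true.mp hvb c hc
    simp only [Bool.or_eq_true, beq_iff_eq] at this
    simp only [List.mem_cons, List.not_mem_nil, or_false]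
    tauto
  unfold Spec_solution
  obtain ⟨c, s, hw⟩ : ∃ c s, word.toList = c :: s := by
    cases h : word.toList with
    | nil => exact absurd h hne
    | cons c s => exact ⟨c, s, rfl⟩
  have hc : c ∈ (['A', 'E', 'I', 'O', 'U'] : List Char) := hv c (by rw [hw]; simp)
  have hs : ∀ d ∈ s, d ∈ (['A', 'E', 'I', 'O', 'U'] : List Char) :=
    fun d hd => hv d (by rw [hw]; simp [hd])
  have hslen : s.length ≤ 4 := by rw [hw] at hlen; simp at hlen; omega
  have hidx : PySem.List.index? (genTable 5 []) word.toList = some (rank 5 (c :: s)) := by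
    rw [hw]
    have := gen_index 4 [] c s hc hs hslen
    simpa using this
  have hB : solution_alt word = (rank 5 (c :: s) : Nat) + 1 := by
    unfold solution_alt
    rw [hidx]
  have hR5 : ((((5 + 1) * 5 + 1) * 5 + 1) * 5 + 1 : Int) = R 5 := by
    simp [R, flen]
  have hA : solution word = (rank 5 (c :: s) : Nat) + 1 := by
    unfold solution
    rw [hR5]
    have hlw : PySem.Str.len word = ((c :: s).length : Int) := by
      rw [PySem.Str.len_eq, hw]
    rw [hlw, hw]
    have hlen5 : (c :: s).length ≤ 5 := hw ▸ hlen
    have hv' : ∀ d ∈ (c :: s), d ∈ (['A', 'E', 'I', 'O', 'U'] : List Char) :=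
      fun d hd => hv d (by rw [hw]; exact hd)
    have hfa := foldA (c :: s) 5 (((c :: s).length : Int)) (by simp) hlen5 hv'
    omega
  rw [hA, hB]
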